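-- pv_equiv track=rewrite | github.com/acornaeology/acornaeology.github.io | generator/glossary.py | _find_text_occurrences
-- ===== SOURCE A (Python) =====
-- def _find_text_occurrences(html_text, pattern):
--     """Find all occurrences of pattern in HTML text nodes.
--
--     Returns a list of (start, end) tuples for matches that fall outside
--     HTML tags and outside <a>...</a> elements."""
--     matches = []
--     i = 0
--     inside_tag = False
--     tag_start = 0
--     anchor_depth = 0
--     pat_len = len(pattern)
--
--     while i < len(html_text):
--         ch = html_text[i]
--
--         if ch == "<":
--             inside_tag = True
--             tag_start = i
--             i += 1
--             continue
--
--         if ch == ">" and inside_tag: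
--             tag_content = html_text[tag_start + 1:i]
--             tag_lower = tag_content.lower().lstrip()
--             if tag_lower.startswith("a ") or tag_lower == "a":
--                 anchor_depth += 1
--             elif tag_lower.startswith("/a"):
--                 anchor_depth = max(0, anchor_depth - 1)
--             inside_tag = False
--             i += 1
--             continue
--
--         if not inside_tag and anchor_depth == 0:
--             if html_text[i:i + pat_len] == pattern:
--                 matches.append((i, i + pat_len))
--                 i += pat_len
--                 continue
--
--         i += 1
--
--     return matches
-- ===== SOURCE B (Python) =====
-- def _find_text_occurrences(html_text, pattern):
--     """Find all occurrences of pattern in HTML text nodes.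
--
--     Precomputes, in one pass, a per-position flag saying whether a match
--     may start there (outside tags, outside <a>...</a>), then jumps between
--     candidate positions with str.find instead of testing the pattern at
--     every index.  If the pattern contains '<' an accepted match swallows
--     tag structure, so the flags are recomputed after such a match."""
--     n = len(html_text)
--     plen = len(pattern)
--
--     def flags_from(start):
--         # allowed[i - start]: scanning from `start` with a fresh state,
--         # may a match start at position i?
--         allowed = []
--         inside = False
--         depth = 0
--         tag_start = 0
--         for i in range(start, n):
--             ch = html_text[i]
--             if ch == "<":
--                 allowed.append(False)
--                 inside = True
--                 tag_start = i
--             elif ch == ">" and inside: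
--                 allowed.append(False)
--                 tag = html_text[tag_start + 1:i].lower().lstrip()
--                 if tag.startswith("a ") or tag == "a":
--                     depth += 1
--                 elif tag.startswith("/a"):
--                     depth = max(0, depth - 1)
--                 inside = False
--             else:
--                 allowed.append(not inside and depth == 0)
--         return allowed
--
--     has_lt = "<" in pattern
--     matches = []
--     base = 0
--     allowed = flags_from(0)
--     pos = 0
--     while True:
--         j = html_text.find(pattern, pos)
--         if j < 0:
--             break
--         if allowed[j - base]:
--             matches.append((j, j + plen))
--             pos = j + plen
--             if has_lt:
--                 base = pos
--                 allowed = flags_from(pos)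
--         else:
--             pos = j + 1
--     return matches
-- ===== Notes on version B (the rewrite author's own statement) =====
-- stated objective: faster
-- what changed: A interleaves tag parsing with a pattern-slice comparison at every text position in one char-by-char loop; B precomputes a per-position allowed flag list in one tag-parsing pass and then jumps between occurrences with str.find (recomputing flags after a match only when the pattern itself contains '<').
-- outside the precondition, e.g. on _find_text_occurrences('<b>', ''): A returns [], B raises IndexError
import Mathlib
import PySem

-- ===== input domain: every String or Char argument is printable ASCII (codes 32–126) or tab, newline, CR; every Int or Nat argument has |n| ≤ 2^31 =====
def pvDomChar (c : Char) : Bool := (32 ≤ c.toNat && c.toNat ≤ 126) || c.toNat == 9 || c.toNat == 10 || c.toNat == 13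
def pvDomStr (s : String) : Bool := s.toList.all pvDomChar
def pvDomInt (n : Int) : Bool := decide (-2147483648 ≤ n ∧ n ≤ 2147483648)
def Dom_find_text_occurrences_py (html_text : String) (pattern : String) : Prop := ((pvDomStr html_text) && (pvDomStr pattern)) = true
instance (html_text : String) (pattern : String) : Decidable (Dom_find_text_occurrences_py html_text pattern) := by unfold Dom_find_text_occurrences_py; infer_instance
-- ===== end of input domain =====

-- B replaces A's single char-by-char scan (pattern slice compared at every text position) by a
-- one-pass precomputed allowed-position flag list plus str.find jumps between candidate matches.

-- ===== PORT A =====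
-- the while loop of _find_text_occurrences; fuel = one unit per iteration (len+1 suffices for
-- nonempty pattern; on the empty pattern Python loops forever — excluded by Pre_ below)
def aLoop (s pat : List Char) (patLen : Nat) : Nat → Nat → Bool → Nat → Nat → List (Int × Int) → List (Int × Int)
  | 0, _, _, _, _, acc => acc
  | fuel+1, i, inside, tagStart, depth, acc =>
    if i < s.length then
      let ch := s.getD i ' '
      if ch = '<' then
        aLoop s pat patLen fuel (i+1) true i depth acc
      else if ch = '>' ∧ inside then
        let tagLower := PySem.Chars.lstrip (PySem.Chars.lower (PySem.List.slice s (some ((tagStart : Int) + 1)) (some (i : Int))))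
        let depth' := if PySem.Chars.startswith tagLower ['a', ' '] ∨ tagLower = ['a'] then depth + 1
                      else if PySem.Chars.startswith tagLower ['/', 'a'] then depth - 1
                      else depth
        aLoop s pat patLen fuel (i+1) false tagStart depth' acc
      else if ¬ inside ∧ depth = 0 ∧ PySem.List.slice s (some (i : Int)) (some ((i : Int) + (patLen : Int))) = pat then
        aLoop s pat patLen fuel (i+patLen) inside tagStart depth (acc ++ [((i : Int), ((i + patLen : Nat) : Int))])
      else
        aLoop s pat patLen fuel (i+1) inside tagStart depth acc
    else acc

def find_text_occurrences_py (html_text : String) (pattern : String) : List (Int × Int) :=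
  aLoop html_text.toList pattern.toList pattern.toList.length (html_text.toList.length + 1) 0 false 0 0 []

-- ===== PORT B =====
-- flags_from(start) of Source B: one scan from `start` with a fresh tag/anchor state
def flagsGo (s : List Char) : List Char → Nat → Bool → Nat → Nat → List Bool
  | [], _, _, _, _ => []
  | ch :: rest, i, inside, tagStart, depth =>
    if ch = '<' then
      false :: flagsGo s rest (i+1) true i depth
    else if ch = '>' ∧ inside then
      let tagLower := PySem.Chars.lstrip (PySem.Chars.lower (PySem.List.slice s (some ((tagStart : Int) + 1)) (some (i : Int))))
      let depth' := if PySem.Chars.startswith tagLower ['a', ' '] ∨ tagLower = ['a'] then depth + 1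
                    else if PySem.Chars.startswith tagLower ['/', 'a'] then depth - 1
                    else depth
      false :: flagsGo s rest (i+1) false tagStart depth'
    else
      (!inside && depth == 0) :: flagsGo s rest (i+1) inside tagStart depth

def flagsFrom (s : List Char) (start : Nat) : List Bool :=
  flagsGo s (s.drop start) start false 0 0

-- the find-jump loop of Source B; fuel = one unit per iteration (pos strictly increases)
def bLoop (s pat : List Char) (patLen : Nat) (hasLt : Bool) : Nat → Nat → Nat → List Bool → List (Int × Int) → List (Int × Int)
  | 0, _, _, _, acc => acc
  | fuel+1, base, pos, flags, acc =>
    let j := PySem.Chars.findFrom s pat (pos : Int) none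
    if j < 0 then acc
    else
      let jn := j.toNat
      if flags.getD (jn - base) false then
        let acc' := acc ++ [((jn : Int), ((jn + patLen : Nat) : Int))]
        if hasLt then
          bLoop s pat patLen hasLt fuel (jn+patLen) (jn+patLen) (flagsFrom s (jn+patLen)) acc'
        else
          bLoop s pat patLen hasLt fuel base (jn+patLen) flags acc'
      else
        bLoop s pat patLen hasLt fuel base (jn+1) flags acc

def find_text_occurrences_py_alt (html_text : String) (pattern : String) : List (Int × Int) :=
  let s := html_text.toList
  let pat := pattern.toList
  bLoop s pat pat.length (PySem.Chars.isIn ['<'] pat) (s.length + 1) 0 0 (flagsFrom s 0) []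

-- ===== PRECONDITION & SPEC =====
-- Pre_ excludes the empty pattern: A's loop then stops advancing at the first position outside
-- tags/anchors and loops forever; on inputs whose every position is inside a tag A still returns []
-- (e.g. ("<b>", "")) while B raises IndexError there.
def Pre_find_text_occurrences_py (html_text : String) (pattern : String) : Prop := pattern ≠ ""
instance (html_text : String) (pattern : String) : Decidable (Pre_find_text_occurrences_py html_text pattern) := by unfold Pre_find_text_occurrences_py; infer_instance

def pvWitness_find_text_occurrences_py : String × String := ("x<a href=q>y</a>xy", "x")

def Spec_find_text_occurrences_py (html_text : String) (pattern : String) (out : List (Int × Int)) : Prop := out = find_text_occurrences_py_alt html_text pattern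
instance (html_text : String) (pattern : String) (out : List (Int × Int)) : Decidable (Spec_find_text_occurrences_py html_text pattern out) := by unfold Spec_find_text_occurrences_py; infer_instance

-- ===== CLAIM (what is proved, stated in full; the proofs are below) =====
def Claim_equal_find_text_occurrences_py : Prop := ∀ (html_text : String) (pattern : String), Dom_find_text_occurrences_py html_text pattern → Pre_find_text_occurrences_py html_text pattern → Spec_find_text_occurrences_py html_text pattern (find_text_occurrences_py html_text pattern)

-- ===== LEMMAS AND PROOFS =====

-- the tag/anchor state (inside_tag, tag_start, anchor_depth) and its one-character step
def stepSt (s : List Char) (i : Nat) : Bool × Nat × Nat → Bool × Nat × Nat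
  | (inside, tagStart, depth) =>
    let ch := s.getD i ' '
    if ch = '<' then (true, i, depth)
    else if ch = '>' ∧ inside then
      let tagLower := PySem.Chars.lstrip (PySem.Chars.lower (PySem.List.slice s (some ((tagStart : Int) + 1)) (some (i : Int))))
      let depth' := if PySem.Chars.startswith tagLower ['a', ' '] ∨ tagLower = ['a'] then depth + 1
                    else if PySem.Chars.startswith tagLower ['/', 'a'] then depth - 1
                    else depth
      (false, tagStart, depth')
    else (inside, tagStart, depth)

def stRun (s : List Char) : Nat → Nat → (Bool × Nat × Nat) → (Bool × Nat × Nat)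
  | _, 0, st => st
  | i, k+1, st => stRun s (i+1) k (stepSt s i st)

-- "A performs the pattern test at i" as a function of the state before i
def flagOf (s : List Char) (i : Nat) (st : Bool × Nat × Nat) : Bool :=
  let ch := s.getD i ' '
  if ch = '<' then false
  else if ch = '>' ∧ st.1 then false
  else !st.1 && st.2.2 == 0

lemma stRun_succ_back (s : List Char) : ∀ (k i : Nat) (st : Bool × Nat × Nat),
    stRun s i (k+1) st = stepSt s (i+k) (stRun s i k st) := by
  intro k
  induction k with
  | zero => intro i st; simp [stRun]
  | succ k ih =>
    intro i st
    have h1 : i + (k + 1) = (i + 1) + k := by omega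
    calc stRun s i (k+2) st = stRun s (i+1) (k+1) (stepSt s i st) := rfl
      _ = stepSt s ((i+1)+k) (stRun s (i+1) k (stepSt s i st)) := ih (i+1) (stepSt s i st)
      _ = stepSt s (i+(k+1)) (stRun s i (k+1) st) := by rw [h1]; rfl

lemma aLoop_past_end (s pat : List Char) (pl f i : Nat) (inside : Bool) (t d : Nat) (acc : List (Int × Int))
    (h : s.length ≤ i) : aLoop s pat pl f i inside t d acc = acc := by
  cases f with
  | zero => rfl
  | succ f => simp [aLoop, Nat.not_lt.mpr h]

lemma aLoop_tagStart_irrel (s pat : List Char) (pl : Nat) : ∀ (f i : Nat) (d : Nat) (acc : List (Int × Int)) (t t' : Nat),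
    aLoop s pat pl f i false t d acc = aLoop s pat pl f i false t' d acc := by
  intro f
  induction f with
  | zero => intros; rfl
  | succ f ih =>
    intro i d acc t t'
    simp only [aLoop]
    by_cases hi : i < s.length
    · simp only [if_pos hi]
      by_cases hlt : s.getD i ' ' = '<'
      · simp only [if_pos hlt]
      · simp only [if_neg hlt]
        have hgt : ¬ (s.getD i ' ' = '>' ∧ (false : Bool) = true) := by simp
        simp only [if_neg hgt]
        by_cases hm : ¬((false : Bool) = true) ∧ d = 0 ∧ PySem.List.slice s (some (i : Int)) (some ((i : Int) + (pl : Int))) = pat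
        · simp only [if_pos hm]; exact ih _ _ _ t t'
        · simp only [if_neg hm]; exact ih _ _ _ t t'
    · simp only [if_neg hi]

lemma stRun_skip (s : List Char) : ∀ (m i : Nat) (t d : Nat), (∀ k, k < m → s.getD (i+k) ' ' ≠ '<') →
    stRun s i m (false, t, d) = (false, t, d) := by
  intro m
  induction m with
  | zero => intros; rfl
  | succ m ih =>
    intro i t d h
    have h0 : s.getD i ' ' ≠ '<' := by simpa using h 0 (Nat.succ_pos m)
    have hstep : stepSt s i (false, t, d) = (false, t, d) := by
      simp only [stepSt]
      rw [if_neg h0]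
      simp
    calc stRun s i (m+1) (false, t, d) = stRun s (i+1) m (stepSt s i (false, t, d)) := rfl
      _ = (false, t, d) := by rw [hstep]; exact ih (i+1) t d (fun k hk => by
            rw [show i+1+k = i+(k+1) from by omega]; exact h (k+1) (by omega))
lemma flags_getD (s : List Char) : ∀ (k i : Nat) (inside : Bool) (t d : Nat), i + k < s.length →
    (flagsGo s (s.drop i) i inside t d).getD k false = flagOf s (i+k) (stRun s i k (inside, t, d)) := by
  intro k
  induction k with
  | zero =>
    intro i inside t d h
    have hi : i < s.length := by omega
    have hg : s.getD i ' ' = s[i] := List.getD_eq_getElem s ' ' hi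
    rw [List.drop_eq_getElem_cons hi]
    simp only [Nat.add_zero, stRun, flagsGo, flagOf, hg]
    split_ifs <;> simp
  | succ k ih =>
    intro i inside t d h
    have hi : i < s.length := by omega
    have hg : s.getD i ' ' = s[i] := List.getD_eq_getElem s ' ' hi
    have hidx : i + (k+1) = (i+1) + k := by omega
    rw [List.drop_eq_getElem_cons hi]
    simp only [flagsGo]
    by_cases h1 : s[i] = '<'
    · rw [if_pos h1]
      have hst : stepSt s i (inside, t, d) = (true, i, d) := by
        simp only [stepSt]; rw [hg, if_pos h1]
      rw [List.getD_cons_succ, ih (i+1) true i d (by omega), hidx]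
      show flagOf s ((i+1)+k) (stRun s (i+1) k (true, i, d)) = flagOf s ((i+1)+k) (stRun s (i+1) k (stepSt s i (inside, t, d)))
      rw [hst]
    · rw [if_neg h1]
      by_cases h2 : s[i] = '>' ∧ inside = true
      · rw [if_pos h2]
        rw [List.getD_cons_succ, ih (i+1) false t _ (by omega), hidx]
        have hst : stepSt s i (inside, t, d)
            = (false, t, if PySem.Chars.startswith (PySem.Chars.lstrip (PySem.Chars.lower (PySem.List.slice s (some ((t : Int) + 1)) (some (i : Int))))) ['a', ' '] ∨ (PySem.Chars.lstrip (PySem.Chars.lower (PySem.List.slice s (some ((t : Int) + 1)) (some (i : Int))))) = ['a'] then d + 1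
                        else if PySem.Chars.startswith (PySem.Chars.lstrip (PySem.Chars.lower (PySem.List.slice s (some ((t : Int) + 1)) (some (i : Int))))) ['/', 'a'] then d - 1
                        else d) := by
          simp only [stepSt]; rw [hg, if_neg h1, if_pos h2]
        show flagOf s ((i+1)+k) (stRun s (i+1) k _) = flagOf s ((i+1)+k) (stRun s (i+1) k (stepSt s i (inside, t, d)))
        rw [hst]
      · rw [if_neg h2]
        rw [List.getD_cons_succ, ih (i+1) inside t d (by omega), hidx]
        have hst : stepSt s i (inside, t, d) = (inside, t, d) := by
          simp only [stepSt]; rw [hg, if_neg h1, if_neg h2]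
        show flagOf s ((i+1)+k) (stRun s (i+1) k (inside, t, d)) = flagOf s ((i+1)+k) (stRun s (i+1) k (stepSt s i (inside, t, d)))
        rw [hst]
lemma L_step (s pat : List Char) (pl : Nat) (i : Nat) (hi : i < s.length)
    (inside : Bool) (t d : Nat) (f : Nat) (acc : List (Int × Int))
    (hnm : flagOf s i (inside, t, d) = true → ¬ pat <+: s.drop i) :
    aLoop s pat pl (f+1) i inside t d acc
      = aLoop s pat pl f (i+1) (stepSt s i (inside, t, d)).1 (stepSt s i (inside, t, d)).2.1 (stepSt s i (inside, t, d)).2.2 acc := by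
  simp only [aLoop]
  rw [if_pos hi]
  by_cases h1 : s.getD i ' ' = '<'
  · rw [if_pos h1]
    have hst : stepSt s i (inside, t, d) = (true, i, d) := by
      simp only [stepSt]; rw [if_pos h1]
    rw [hst]
  · rw [if_neg h1]
    by_cases h2 : s.getD i ' ' = '>' ∧ inside = true
    · rw [if_pos h2]
      have hst : stepSt s i (inside, t, d)
          = (false, t, if PySem.Chars.startswith (PySem.Chars.lstrip (PySem.Chars.lower (PySem.List.slice s (some ((t : Int) + 1)) (some (i : Int))))) ['a', ' '] ∨ (PySem.Chars.lstrip (PySem.Chars.lower (PySem.List.slice s (some ((t : Int) + 1)) (some (i : Int))))) = ['a'] then d + 1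
                      else if PySem.Chars.startswith (PySem.Chars.lstrip (PySem.Chars.lower (PySem.List.slice s (some ((t : Int) + 1)) (some (i : Int))))) ['/', 'a'] then d - 1
                      else d) := by
        simp only [stepSt]; rw [if_neg h1, if_pos h2]
      rw [hst]
    · rw [if_neg h2]
      have hst : stepSt s i (inside, t, d) = (inside, t, d) := by
        simp only [stepSt]; rw [if_neg h1, if_neg h2]
      have h3 : ¬ (¬ inside = true ∧ d = 0 ∧ PySem.List.slice s (some (i : Int)) (some ((i : Int) + (pl : Int))) = pat) := by
        rintro ⟨hins, hd, hsl⟩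
        have hflag : flagOf s i (inside, t, d) = true := by
          simp only [flagOf]
          rw [if_neg h1, if_neg h2]
          simp [Bool.not_eq_true] at hins ⊢
          exact ⟨hins, hd⟩
        apply hnm hflag
        rw [PySem.List.slice_natCast_add] at hsl
        exact hsl ▸ List.take_prefix pl (List.drop i s)
      rw [if_neg h3, hst]

lemma L_gap (s pat : List Char) (pl : Nat) : ∀ (m i : Nat) (inside : Bool) (t d f : Nat) (acc : List (Int × Int)),
    i + m ≤ s.length → m ≤ f → (∀ k, k < m → ¬ pat <+: s.drop (i+k)) →
    aLoop s pat pl f i inside t d acc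
      = aLoop s pat pl (f - m) (i+m) (stRun s i m (inside, t, d)).1 (stRun s i m (inside, t, d)).2.1 (stRun s i m (inside, t, d)).2.2 acc := by
  intro m
  induction m with
  | zero => intros; simp [stRun]
  | succ m ih =>
    intro i inside t d f acc hlen hf hgap
    obtain ⟨f', rfl⟩ : ∃ f', f = f' + 1 := ⟨f - 1, by omega⟩
    have hi : i < s.length := by omega
    rw [L_step s pat pl i hi inside t d f' acc (fun _ => by simpa using hgap 0 (by omega))]
    have := ih (i+1) (stepSt s i (inside, t, d)).1 (stepSt s i (inside, t, d)).2.1 (stepSt s i (inside, t, d)).2.2 f' acc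
      (by omega) (by omega) (fun k hk => by rw [show i+1+k = i+(k+1) from by omega]; exact hgap (k+1) (by omega))
    rw [this]
    have harg : stRun s (i+1) m ((stepSt s i (inside, t, d)).1, (stepSt s i (inside, t, d)).2.1, (stepSt s i (inside, t, d)).2.2) = stRun s i (m+1) (inside, t, d) := rfl
    rw [harg, show i+1+m = i+(m+1) from by omega, show f' - m = f'+1 - (m+1) from by omega]
lemma stRun_add (s : List Char) : ∀ (m k i : Nat) (st : Bool × Nat × Nat),
    stRun s i (m+k) st = stRun s (i+m) k (stRun s i m st) := by
  intro m
  induction m with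
  | zero => intro k i st; simp [stRun]
  | succ m ih =>
    intro k i st
    have h1 : m + 1 + k = (m + k) + 1 := by omega
    calc stRun s i ((m+1)+k) st = stRun s (i+1) (m+k) (stepSt s i st) := by rw [h1]; rfl
      _ = stRun s ((i+1)+m) k (stRun s (i+1) m (stepSt s i st)) := ih k (i+1) (stepSt s i st)
      _ = stRun s (i+(m+1)) k (stRun s i (m+1) st) := by rw [show (i+1)+m = i+(m+1) from by omega]; rfl
lemma KEY (s pat : List Char) (hpl : 1 ≤ pat.length) : ∀ (fB base pos : Nat) (inside : Bool) (t d : Nat) (acc : List (Int × Int)) (fA : Nat),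
    base ≤ pos → pos ≤ s.length →
    stRun s base (pos - base) (false, 0, 0) = (inside, t, d) →
    s.length - pos < fB → s.length - pos < fA →
    aLoop s pat pat.length fA pos inside t d acc
      = bLoop s pat pat.length (PySem.Chars.isIn ['<'] pat) fB base pos (flagsFrom s base) acc := by
  intro fB
  induction fB with
  | zero => intro base pos inside t d acc fA hbp hpos hst hfB hfA; omega
  | succ fB ih =>
    intro base pos inside t d acc fA hbp hpos hst hfB hfA
    simp only [bLoop]
    have hj := PySem.Chars.findFrom_natCast s pat pos hpos
    by_cases hneg : PySem.Chars.findFrom s pat (pos : Int) none < 0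
    · rw [if_pos hneg]
      have hm1 : PySem.Chars.findFrom s pat (pos : Int) none = -1 := by
        by_cases hf : PySem.Chars.find (s.drop pos) pat = -1
        · rw [hj, if_pos hf]
        · exfalso
          have h0 : -1 ≤ PySem.Chars.find (s.drop pos) pat := PySem.Chars.neg_one_le_find _ _
          rw [hj, if_neg hf] at hneg
          omega
      have hnone : ¬ pat <:+: s.drop pos := (PySem.Chars.findFrom_natCast_eq_neg_one_iff s pat pos hpos).mp hm1
      have hgap : ∀ k, k < s.length - pos → ¬ pat <+: s.drop (pos+k) := by
        intro k _ hpre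
        apply hnone
        have hsub : s.drop (pos+k) <:+ s.drop pos := by
          have hdd : (s.drop pos).drop k = s.drop (pos+k) := by
            rw [List.drop_drop]
          rw [← hdd]
          exact List.drop_suffix k (s.drop pos)
        exact hpre.isInfix.trans hsub.isInfix
      rw [L_gap s pat pat.length (s.length - pos) pos inside t d fA acc (by omega) (by omega) hgap]
      exact aLoop_past_end s pat pat.length _ _ _ _ _ acc (by omega)
    · rw [if_neg hneg]
      have hne : PySem.Chars.findFrom s pat (pos : Int) none ≠ -1 := by intro h; rw [h] at hneg; norm_num at hneg
      obtain ⟨hle, hpre, hmin⟩ := PySem.Chars.findFrom_natCast_spec s pat pos hpos hne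
      have hnneg : 0 ≤ PySem.Chars.findFrom s pat (pos : Int) none := le_trans (by positivity) hle
      set jn := (PySem.Chars.findFrom s pat (pos : Int) none).toNat with hjn
      have hposle : pos ≤ jn := by
        have := Int.toNat_le_toNat hle
        simpa using this
      have hjnlen : jn + pat.length ≤ s.length := by
        have := hpre.length_le
        simp only [List.length_drop] at this
        omega
      have hjlt : jn < s.length := by omega
      have hflag := flags_getD s (jn - base) base false 0 0 (by omega)
      rw [show base + (jn - base) = jn from by omega] at hflag
      have hstj : stRun s pos (jn - pos) (inside, t, d) = stRun s base (jn - base) (false, 0, 0) := by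
        have hcomp := stRun_add s (pos - base) (jn - pos) base (false, 0, 0)
        rw [show base + (pos - base) = pos from by omega,
          show pos - base + (jn - pos) = jn - base from by omega] at hcomp
        rw [← hst]
        exact hcomp.symm
      have hgap : ∀ k, k < jn - pos → ¬ pat <+: s.drop (pos+k) := fun k hk => hmin (pos+k) (by omega) (by omega)
      rw [L_gap s pat pat.length (jn - pos) pos inside t d fA acc (by omega) (by omega) hgap,
        show pos + (jn - pos) = jn from by omega, hstj]
      obtain ⟨insj, tj, dj, hstj2⟩ : ∃ a b c, stRun s base (jn - base) (false, 0, 0) = (a, b, c) := ⟨_, _, _, rfl⟩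
      rw [hstj2] at hflag ⊢
      obtain ⟨fA', hfA'⟩ : ∃ f, fA - (jn - pos) = f + 1 := ⟨fA - (jn - pos) - 1, by omega⟩
      rw [hfA']
      show aLoop s pat pat.length (fA' + 1) jn insj tj dj acc = _
      by_cases hfl : (flagsFrom s base).getD (jn - base) false
      · rw [if_pos hfl]
        have hflagOf : flagOf s jn (insj, tj, dj) = true := by rw [← hflag]; exact hfl
        have hch1 : ¬ s.getD jn ' ' = '<' := by
          intro h
          simp only [flagOf] at hflagOf
          rw [if_pos h] at hflagOf
          exact absurd hflagOf (by simp)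
        have hins : insj = false ∧ dj = 0 := by
          simp only [flagOf] at hflagOf
          rw [if_neg hch1] at hflagOf
          by_cases h2 : s.getD jn ' ' = '>' ∧ insj = true
          · rw [if_pos h2] at hflagOf; exact absurd hflagOf (by simp)
          · rw [if_neg h2] at hflagOf; simpa using hflagOf
        obtain ⟨hins1, hins2⟩ := hins
        subst hins1; subst hins2
        simp only [aLoop]
        rw [if_pos hjlt, if_neg hch1]
        have h2' : ¬ (s.getD jn ' ' = '>' ∧ (false : Bool) = true) := by simp
        rw [if_neg h2']
        have hslice : PySem.List.slice s (some (jn : Int)) (some ((jn : Int) + (pat.length : Int))) = pat := by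
          rw [PySem.List.slice_natCast_add]
          exact (List.prefix_iff_eq_take.mp hpre).symm
        have hcond : ¬ (false : Bool) = true ∧ True ∧ PySem.List.slice s (some (jn : Int)) (some ((jn : Int) + (pat.length : Int))) = pat := ⟨by simp, trivial, hslice⟩
        rw [if_pos hcond]
        by_cases hlt : PySem.Chars.isIn ['<'] pat
        · rw [if_pos hlt]
          rw [aLoop_tagStart_irrel s pat pat.length fA' (jn + pat.length) 0 _ tj 0]
          exact ih (jn + pat.length) (jn + pat.length) false 0 0 _ fA' (le_refl _) (by omega) (by rw [Nat.sub_self]; rfl) (by omega) (by omega)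
        · rw [if_neg hlt]
          have hfalse : PySem.Chars.isIn ['<'] pat = false := by
            revert hlt; cases PySem.Chars.isIn ['<'] pat <;> simp
          have hnoLt : '<' ∉ pat := fun hmem =>
            ((PySem.Chars.isIn_eq_false_iff _ _).mp hfalse) ((List.singleton_infix_iff '<' pat).mpr hmem)
          have hchars : ∀ k, k < pat.length → s.getD (jn + k) ' ' ≠ '<' := by
            intro k hk
            obtain ⟨r, hr⟩ := hpre
            have h1 : s[jn + k]? = pat[k]? := by
              rw [← List.getElem?_drop, ← hr, List.getElem?_append_left hk]
            have hgd : s.getD (jn + k) ' ' = pat[k] := by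
              rw [List.getD_eq_getElem?_getD, h1, List.getElem?_eq_getElem hk, Option.getD_some]
            rw [hgd]
            intro hc
            exact hnoLt (hc ▸ List.getElem_mem hk)
          have hstnext : stRun s base (jn + pat.length - base) (false, 0, 0) = (false, tj, 0) := by
            rw [show jn + pat.length - base = (jn - base) + pat.length from by omega,
              stRun_add s (jn - base) pat.length base (false, 0, 0),
              show base + (jn - base) = jn from by omega, hstj2]
            exact stRun_skip s pat.length jn tj 0 hchars
          exact ih base (jn + pat.length) false tj 0 _ fA' (by omega) (by omega) hstnext (by omega) (by omega)
      · rw [if_neg hfl]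
        have hflagOf : flagOf s jn (insj, tj, dj) = false := by
          rw [← hflag]
          exact Bool.eq_false_iff.mpr hfl
        rw [L_step s pat pat.length jn hjlt insj tj dj fA' acc (fun h => absurd h (by rw [hflagOf]; simp))]
        have hstnext : stRun s base (jn + 1 - base) (false, 0, 0) = stepSt s jn (insj, tj, dj) := by
          rw [show jn + 1 - base = (jn - base) + 1 from by omega,
            stRun_succ_back s (jn - base) base (false, 0, 0),
            show base + (jn - base) = jn from by omega, hstj2]
        exact ih base (jn + 1) (stepSt s jn (insj, tj, dj)).1 (stepSt s jn (insj, tj, dj)).2.1 (stepSt s jn (insj, tj, dj)).2.2 acc fA'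
          (by omega) (by omega) (by rw [hstnext]) (by omega) (by omega)

-- ===== VERDICT (by name: the statement is the Claim_ definition above) =====
theorem find_text_occurrences_py_spec : Claim_equal_find_text_occurrences_py := by
  intro html_text pattern _dom hpre
  unfold Spec_find_text_occurrences_py
  unfold find_text_occurrences_py find_text_occurrences_py_alt
  have hne : pattern.toList ≠ [] := fun h => hpre (String.toList_eq_nil_iff.mp h)
  have hpl : 1 ≤ pattern.toList.length := by
    cases h : pattern.toList with
    | nil => exact absurd h hne
    | cons a l => simp
  exact KEY html_text.toList pattern.toList hpl (html_text.toList.length + 1) 0 0 false 0 0 [] (html_text.toList.length + 1)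
    (Nat.zero_le _) (Nat.zero_le _) rfl (by omega) (by omega)
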